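-- pv_equiv track=rewrite | github.com/erebks/advent-of-code | python/2020/day5_2.py | _calcCol
-- ===== SOURCE A (Python) =====
-- def _calcCol(code):
--     lowLim = 0
--     upLim = 2**3-1
--     for i in range(len(code)):
--         if (code[i] == 'R'):
--             lowLim += 2**i
--         elif (code[i] == 'L'):
--             upLim -= 2**i
--     return lowLim
-- ===== SOURCE B (Python) =====
-- def _calcCol(code):
--     # Column = value of the 'R' bits read as a little-endian binary number:
--     # build the bit string in reverse order and let int(_, 2) do the accumulation
--     # (the leading '0' makes the empty code parse to 0).
--     bits = ''.join('1' if c == 'R' else '0' for c in reversed(code))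
--     return int('0' + bits, 2)
-- ===== Notes on version B (the rewrite author's own statement) =====
-- stated objective: idiomatic
-- what changed: Replaces the explicit power-of-two accumulator loop (and the dead upLim bookkeeping) with mapping each character to a bit, reversing, and parsing the bit string with int(_, 2).
import Mathlib
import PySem

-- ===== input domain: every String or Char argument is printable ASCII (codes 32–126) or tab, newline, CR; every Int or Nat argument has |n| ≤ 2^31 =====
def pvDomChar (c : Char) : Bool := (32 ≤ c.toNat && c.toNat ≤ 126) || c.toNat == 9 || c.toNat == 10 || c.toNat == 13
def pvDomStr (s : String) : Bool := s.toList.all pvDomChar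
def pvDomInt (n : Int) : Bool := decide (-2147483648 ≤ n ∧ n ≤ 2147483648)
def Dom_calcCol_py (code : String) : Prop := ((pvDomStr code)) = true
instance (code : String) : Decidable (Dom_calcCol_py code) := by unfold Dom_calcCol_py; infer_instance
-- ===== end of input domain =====

-- B replaces A's explicit power-of-two accumulator loop by mapping chars to bits,
-- reversing, and parsing the bit string in base 2 (idiomatic; return value only).

-- ===== PORT A =====
-- loop over range(len(code)) carrying the pair (lowLim, upLim); code[i] is always in
-- range here, so pyGetD is exact.
def calcCol_py (code : String) : Int :=
  let cs := code.toList
  let st := (PySem.List.pyRange 0 (PySem.List.len cs) 1).foldl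
    (fun (st : Int × Int) i =>
      if PySem.List.pyGetD cs i ' ' = 'R' then (st.1 + 2 ^ i.toNat, st.2)
      else if PySem.List.pyGetD cs i ' ' = 'L' then (st.1, st.2 - 2 ^ i.toNat)
      else st)
    (0, 2 ^ 3 - 1)
  st.1

-- ===== PORT B =====
-- hand port of int(s, 2); exact for strings of '0'/'1' digits, which is all B builds.
def pvParseBin2 (s : List Char) : Int :=
  s.foldl (fun acc c => 2 * acc + (if c = '1' then 1 else 0)) 0

def calcCol_py_alt (code : String) : Int :=
  let bits := code.toList.map (fun c => if c = 'R' then '1' else '0')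
  pvParseBin2 ('0' :: bits.reverse)

-- ===== PRECONDITION & SPEC =====
def Spec_calcCol_py (code : String) (out : Int) : Prop := out = calcCol_py_alt code
instance (code : String) (out : Int) : Decidable (Spec_calcCol_py code out) := by unfold Spec_calcCol_py; infer_instance

-- ===== CLAIM (what is proved, stated in full; the proofs are below) =====
def Claim_equal_calcCol_py : Prop := ∀ (code : String), Dom_calcCol_py code → Spec_calcCol_py code (calcCol_py code)

-- ===== LEMMAS AND PROOFS =====

-- little-endian value of the 'R' bits: the common reference both ports reduce to
def pvBits (cs : List Char) : Int :=
  cs.foldr (fun c acc => 2 * acc + (if c = 'R' then 1 else 0)) 0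

-- A's pair-state fold projects to a fold of lowLim alone (upLim is dead state)
lemma pv_fst_foldl (cs : List Char) (l : List Int) (x y : Int) :
    (l.foldl
      (fun (st : Int × Int) i =>
        if PySem.List.pyGetD cs i ' ' = 'R' then (st.1 + 2 ^ i.toNat, st.2)
        else if PySem.List.pyGetD cs i ' ' = 'L' then (st.1, st.2 - 2 ^ i.toNat)
        else st) (x, y)).1
    = l.foldl (fun acc i => if PySem.List.pyGetD cs i ' ' = 'R' then acc + 2 ^ i.toNat else acc) x := by
  induction l generalizing x y with
  | nil => rfl
  | cons a t ih => simp only [List.foldl_cons]; split_ifs <;> simp [ih]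

-- A's lowLim loop from index a onward adds 2^a · pvBits (cs.drop a)
lemma pv_A_loop (cs : List Char) (n : ℕ) : ∀ (a : Int), 0 ≤ a → (cs.length : Int) - a = n →
    ∀ acc : Int,
    (PySem.List.pyRange a (cs.length : Int) 1).foldl
      (fun acc i => if PySem.List.pyGetD cs i ' ' = 'R' then acc + 2 ^ i.toNat else acc) acc
    = acc + 2 ^ a.toNat * pvBits (cs.drop a.toNat) := by
  induction n with
  | zero =>
    intro a ha hn acc
    have hlen : (cs.length : Int) ≤ a := by omega
    have hdrop : cs.drop a.toNat = [] := by
      apply List.drop_eq_nil_of_le; omega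
    rw [PySem.List.pyRange_one_eq_nil hlen, hdrop]
    simp [pvBits]
  | succ n ih =>
    intro a ha hn acc
    have hlt : a < (cs.length : Int) := by omega
    have hnat : a.toNat < cs.length := by omega
    rw [PySem.List.pyRange_one_cons hlt]
    have hget : PySem.List.pyGetD cs a ' ' = cs[a.toNat] :=
      PySem.List.pyGetD_eq_getElem cs ' ' ha (by exact_mod_cast hlt)
    have hdrop : cs.drop a.toNat = cs[a.toNat] :: cs.drop (a.toNat + 1) :=
      (List.getElem_cons_drop hnat).symm
    have ha1 : (a + 1).toNat = a.toNat + 1 := by omega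
    simp only [List.foldl_cons, hget]
    rw [ih (a + 1) (by omega) (by omega)]
    rw [hdrop]
    simp only [pvBits, List.foldr_cons, ha1]
    by_cases hc : cs[a.toNat] = 'R' <;> simp [hc, pow_succ] <;> ring

lemma pv_A_eq_bits (code : String) : calcCol_py code = pvBits code.toList := by
  unfold calcCol_py
  set cs := code.toList with hcs
  simp only [PySem.List.len]
  rw [pv_fst_foldl]
  have := pv_A_loop cs cs.length 0 le_rfl (by simp) 0
  simpa using this

lemma pv_B_eq_bits (code : String) : calcCol_py_alt code = pvBits code.toList := by
  unfold calcCol_py_alt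
  induction code.toList with
  | nil => rfl
  | cons c t ih =>
    simp only [List.map_cons, List.reverse_cons, pvParseBin2, pvBits] at *
    rw [show ('0' :: ((t.map fun c => if c = 'R' then '1' else '0').reverse ++ [if c = 'R' then '1' else '0']))
        = ('0' :: (t.map fun c => if c = 'R' then '1' else '0').reverse) ++ [if c = 'R' then '1' else '0'] from rfl,
      List.foldl_append]
    rw [ih]
    by_cases hc : c = 'R' <;> simp [hc]

-- ===== VERDICT (by name: the statement is the Claim_ definition above) =====
theorem calcCol_py_spec : Claim_equal_calcCol_py := by
  intro code _
  unfold Spec_calcCol_py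
  rw [pv_A_eq_bits, pv_B_eq_bits]
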